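-- pv_equiv track=rewrite | github.com/heuristicwave/-TrainingGround | acmicpc/DFS/12100_2048.py | convert
-- ===== SOURCE A (Python) =====
-- def convert(lst, N):
--     # 0이 아닌 merge 대상들, 그냥 if i 쓰면 0은 걸러짐
--     new_list = [i for i in lst if i != 0]
--     for i in range(1, len(new_list)):
--         if new_list[i-1] == new_list[i]:
--             new_list[i-1] *= 2  # 같은거 2배
--             new_list[i] = 0     # 전 값은 0으로
--     # merge 이후 생긴 0제거, ex) 2,2,2 > 4,0,2 > 4,2
--     new_list = [i for i in new_list if i]
--     return new_list + [0] * (N-len(new_list))   # 나머지는 0으로 채움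
-- ===== SOURCE B (Python) =====
-- def convert(lst, N):
--     vals = [v for v in lst if v != 0]
--     out = []
--     i = 0
--     n = len(vals)
--     while i < n:
--         if i + 1 < n and vals[i] == vals[i + 1]:
--             out.append(vals[i] * 2)
--             i += 2
--         else:
--             out.append(vals[i])
--             i += 1
--     return out + [0] * (N - len(out))
-- ===== Notes on version B (the rewrite author's own statement) =====
-- stated objective: simpler
-- what changed: Replaces A's three-phase shape (filter zeros, index loop that marks merged tiles as 0 in place, second filter) with a single forward pass that consumes one or two equal tiles per step and appends the merged value directly, then pads.
import Mathlib
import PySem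

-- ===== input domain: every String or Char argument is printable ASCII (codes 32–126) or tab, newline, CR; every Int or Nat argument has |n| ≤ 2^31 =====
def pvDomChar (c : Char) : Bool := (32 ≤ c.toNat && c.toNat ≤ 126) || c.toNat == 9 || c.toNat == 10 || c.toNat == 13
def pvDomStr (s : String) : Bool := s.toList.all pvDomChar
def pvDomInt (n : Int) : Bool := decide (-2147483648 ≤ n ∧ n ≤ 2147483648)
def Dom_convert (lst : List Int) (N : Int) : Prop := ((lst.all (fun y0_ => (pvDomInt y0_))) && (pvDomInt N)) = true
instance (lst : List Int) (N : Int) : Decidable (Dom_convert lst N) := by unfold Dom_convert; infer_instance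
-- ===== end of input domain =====

-- B merges a 2048 row in one forward pass that consumes one or two tiles at a time,
-- replacing A's mark-merged-as-zero-then-refilter two-phase loop (objective: simpler).

-- ===== PORT A =====
-- the body of A's `for i in range(1, len(new_list))` loop
def stepA (acc : List Int) (i : Int) : List Int :=
  if PySem.List.pyGetD acc (i - 1) 0 = PySem.List.pyGetD acc i 0 then
    PySem.List.pySetD (PySem.List.pySetD acc (i - 1) (PySem.List.pyGetD acc (i - 1) 0 * 2)) i 0
  else acc

def convert (lst : List Int) (N : Int) : List Int :=
  let nl := lst.filter (fun i => decide (i ≠ 0))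
  let nl2 := (PySem.List.pyRange 1 nl.length 1).foldl stepA nl
  let nl3 := nl2.filter (fun i => decide (i ≠ 0))
  nl3 ++ List.replicate (N - nl3.length).toNat 0

-- ===== PORT B =====
-- the `while i < n` loop of Source B: consume two equal tiles or one tile per iteration
def mergePairs : List Int → List Int
  | [] => []
  | [a] => [a]
  | a :: b :: t => if a = b then a * 2 :: mergePairs t else a :: mergePairs (b :: t)

def convert_alt (lst : List Int) (N : Int) : List Int :=
  let vals := lst.filter (fun v => decide (v ≠ 0))
  let out := mergePairs vals
  out ++ List.replicate (N - out.length).toNat 0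

-- ===== PRECONDITION & SPEC =====
def Spec_convert (lst : List Int) (N : Int) (out : List Int) : Prop := out = convert_alt lst N
instance (lst : List Int) (N : Int) (out : List Int) : Decidable (Spec_convert lst N out) := by unfold Spec_convert; infer_instance

-- ===== CLAIM (what is proved, stated in full; the proofs are below) =====
def Claim_equal_convert : Prop := ∀ (lst : List Int) (N : Int), Dom_convert lst N → Spec_convert lst N (convert lst N)

-- ===== LEMMAS AND PROOFS =====

lemma stepA_append (p r : List Int) (m : Nat) :
    stepA (p ++ r) ((p.length : Int) + ((m : Int) + 1)) = p ++ stepA r ((m : Int) + 1) := by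
  have h1 : (p.length : Int) + ((m : Int) + 1) - 1 = ((p.length + m : Nat) : Int) := by push_cast; ring
  have h2 : (p.length : Int) + ((m : Int) + 1) = ((p.length + (m + 1) : Nat) : Int) := by push_cast; ring
  have h3 : ((m : Int) + 1) - 1 = ((m : Nat) : Int) := by ring
  have h4 : ((m : Int) + 1) = (((m + 1 : Nat)) : Int) := by push_cast; ring
  simp only [stepA]
  rw [h1, h2, h3, h4]
  simp only [PySem.List.pyGetD_natCast, PySem.List.pySetD_natCast]
  have hg1 : (p ++ r).getD (p.length + m) 0 = r.getD m 0 := by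
    simp [List.getD, List.getElem?_append_right (Nat.le_add_right _ _)]
  have hg2 : (p ++ r).getD (p.length + (m + 1)) 0 = r.getD (m + 1) 0 := by
    simp [List.getD, List.getElem?_append_right (Nat.le_add_right _ _)]
  rw [hg1, hg2]
  split
  · rw [List.set_append_right _ _ (Nat.le_add_right _ _),
        List.set_append_right _ _ (Nat.le_add_right _ _)]
    simp
  · rfl

lemma foldl_stepA_shift (p : List Int) (b : Int) :
    ∀ (n : Nat) (a : Int) (r : List Int), 1 ≤ a → (b - ((p.length : Int) + a)).toNat = n →
    (PySem.List.pyRange ((p.length : Int) + a) b 1).foldl stepA (p ++ r) =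
      p ++ (PySem.List.pyRange a (b - (p.length : Int)) 1).foldl stepA r := by
  intro n
  induction n with
  | zero =>
    intro a r ha hn
    rw [PySem.List.pyRange_one_eq_nil (by omega), PySem.List.pyRange_one_eq_nil (by omega)]
    simp
  | succ k ih =>
    intro a r ha hn
    have hlt : (p.length : Int) + a < b := by omega
    rw [PySem.List.pyRange_one_cons hlt, PySem.List.pyRange_one_cons (show a < b - (p.length : Int) by omega)]
    simp only [List.foldl_cons]
    obtain ⟨m, rfl⟩ : ∃ m : Nat, a = (m : Int) + 1 := ⟨(a - 1).toNat, by omega⟩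
    rw [stepA_append p r m]
    have := ih ((m : Int) + 1 + 1) (stepA r ((m : Int) + 1)) (by omega) (by omega)
    rw [show (p.length : Int) + ((m : Int) + 1) + 1 = (p.length : Int) + ((m : Int) + 1 + 1) by ring]
    exact this

lemma stepA_one (a b : Int) (t : List Int) :
    stepA (a :: b :: t) 1 = if a = b then a * 2 :: 0 :: t else a :: b :: t := by
  by_cases hab : a = b <;> simp [stepA, pysem, hab]

lemma stepA_two (x y z : Int) (t : List Int) (hyz : y ≠ z) :
    stepA (x :: y :: z :: t) 2 = x :: y :: z :: t := by
  simp [stepA, pysem, hyz]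

lemma shift_one (x : Int) (r : List Int) (b : Int) :
    (PySem.List.pyRange 2 b 1).foldl stepA (x :: r) =
      x :: (PySem.List.pyRange 1 (b - 1) 1).foldl stepA r := by
  have h := foldl_stepA_shift [x] b ((b - ((([x] : List Int).length : Int) + 1)).toNat) 1 r le_rfl rfl
  norm_num at h
  exact h

lemma shift_two (x y : Int) (r : List Int) (b : Int) :
    (PySem.List.pyRange 3 b 1).foldl stepA (x :: y :: r) =
      x :: y :: (PySem.List.pyRange 1 (b - 2) 1).foldl stepA r := by
  have h := foldl_stepA_shift [x, y] b ((b - ((([x, y] : List Int).length : Int) + 1)).toNat) 1 r le_rfl rfl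
  norm_num at h
  exact h

lemma core_eq : ∀ (l : List Int), (∀ x ∈ l, x ≠ 0) →
    ((PySem.List.pyRange 1 (l.length : Int) 1).foldl stepA l).filter (fun i => decide (i ≠ 0))
      = mergePairs l := by
  intro l
  induction l using mergePairs.induct with
  | case1 => intro _; simp [PySem.List.pyRange_one_eq_nil, mergePairs]
  | case2 a =>
    intro h
    simp [PySem.List.pyRange_one_eq_nil, mergePairs, h a (by simp)]
  | case3 a t ih =>
    intro h
    have ha : a ≠ 0 := h a (by simp)
    have hn : (1 : Int) < (((a :: a :: t)).length : Int) := by simp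
    rw [PySem.List.pyRange_one_cons hn]
    simp only [List.foldl_cons, stepA_one, if_true]
    rw [show (1 : Int) + 1 = 2 by norm_num]
    match t with
    | [] =>
      rw [PySem.List.pyRange_one_eq_nil (by simp)]
      simp [mergePairs, mul_ne_zero ha (by norm_num : (2:Int) ≠ 0)]
    | c :: t' =>
      have hc : c ≠ 0 := h c (by simp)
      have hn2 : (2 : Int) < ((a :: a :: c :: t').length : Int) := by simp; omega
      rw [PySem.List.pyRange_one_cons hn2]
      simp only [List.foldl_cons]
      rw [stepA_two _ _ _ _ (Ne.symm hc)]
      rw [show (2 : Int) + 1 = 3 by norm_num]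
      rw [shift_two]
      rw [show ((a :: a :: c :: t').length : Int) - 2 = ((c :: t').length : Int) by simp; ring]
      have ihc := ih (fun x hx => h x (by simp at hx ⊢; tauto))
      simp only [ne_eq, decide_not, List.length_cons] at ihc
      push_cast at ihc
      simp [mergePairs, mul_ne_zero ha (by norm_num : (2:Int) ≠ 0), ihc]
  | case4 a b t hab ih =>
    intro h
    have ha : a ≠ 0 := h a (by simp)
    have hn : (1 : Int) < ((a :: b :: t).length : Int) := by simp
    rw [PySem.List.pyRange_one_cons hn]
    simp only [List.foldl_cons, stepA_one, if_neg hab]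
    rw [show (1 : Int) + 1 = 2 by norm_num]
    rw [shift_one]
    rw [show ((a :: b :: t).length : Int) - 1 = ((b :: t).length : Int) by simp]
    have ihc := ih (fun x hx => h x (by simp at hx ⊢; tauto))
    simp only [ne_eq, decide_not, List.length_cons] at ihc
    push_cast at ihc
    simp [mergePairs, ha, hab, ihc]

-- ===== VERDICT (by name: the statement is the Claim_ definition above) =====
theorem convert_spec : Claim_equal_convert := by
  intro lst N _
  unfold Spec_convert convert convert_alt
  have hcore := core_eq (lst.filter (fun i => decide (i ≠ 0)))
    (fun x hx => by simpa using (List.of_mem_filter hx))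
  simp only [hcore]
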